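-- pv_equiv track=rewrite | github.com/palette-swapped-serra/dsa-extras | dsa_extras/huffmancodec.py | check_ranges
-- ===== SOURCE A (Python) =====
-- def check_ranges(bases, lookups, values):
--     result = []
--     for base, lookup, value in zip(bases, lookups, values):
--         if lookup is None:
--             if value != base:
--                 return None
--             continue
--         index = value - base
--         if 0 <= index < len(lookup):
--             result.append(lookup[index])
--         else:
--             return None
--     return result
-- ===== SOURCE B (Python) =====
-- def check_ranges(bases, lookups, values):
--     triples = list(zip(bases, lookups, values))
--     for base, lookup, value in triples:
--         if lookup is None:
--             if value != base:
--                 return None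
--         elif not (0 <= value - base < len(lookup)):
--             return None
--     return [lookup[value - base]
--             for base, lookup, value in triples
--             if lookup is not None]
-- ===== Notes on version B (the rewrite author's own statement) =====
-- stated objective: alternative
-- what changed: B first validates all zipped triples in one pass and, only if everything is in range, builds the output with a separate filtering comprehension, instead of A's single pass that appends to an accumulator and early-returns mid-construction.
import Mathlib
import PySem

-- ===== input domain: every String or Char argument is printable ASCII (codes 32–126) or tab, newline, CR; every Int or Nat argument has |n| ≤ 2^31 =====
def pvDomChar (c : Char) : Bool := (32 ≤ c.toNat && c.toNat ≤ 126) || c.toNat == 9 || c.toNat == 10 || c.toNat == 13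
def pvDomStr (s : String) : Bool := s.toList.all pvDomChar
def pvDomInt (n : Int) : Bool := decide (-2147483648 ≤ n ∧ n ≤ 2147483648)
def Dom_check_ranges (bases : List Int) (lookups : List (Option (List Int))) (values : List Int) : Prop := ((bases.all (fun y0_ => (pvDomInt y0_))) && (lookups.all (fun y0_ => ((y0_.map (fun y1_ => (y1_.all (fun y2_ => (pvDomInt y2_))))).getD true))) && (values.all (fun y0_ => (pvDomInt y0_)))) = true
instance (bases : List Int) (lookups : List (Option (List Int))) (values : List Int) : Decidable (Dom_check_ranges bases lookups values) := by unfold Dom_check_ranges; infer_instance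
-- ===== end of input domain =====

-- B validates all zipped triples first, then builds the output in a second filtering pass (alternative decomposition; same cost).

-- ===== PORT A =====
-- loop of A: walks the three lists in lockstep (zip stops at the shortest), appending to `result`, early `none` on a failure
def checkRangesGo (bases : List Int) (lookups : List (Option (List Int))) (values : List Int) (result : List Int) : Option (List Int) :=
  match bases, lookups, values with
  | base :: bs, lookup :: ls, value :: vs =>
    match lookup with
    | none =>
      if value != base then none
      else checkRangesGo bs ls vs result
    | some lk =>
      let index := value - base
      if 0 ≤ index ∧ index < lk.length then
        checkRangesGo bs ls vs (result ++ [(PySem.List.pyGet? lk index).getD 0])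
      else none
  | _, _, _ => some result

def check_ranges (bases : List Int) (lookups : List (Option (List Int))) (values : List Int) : Option (List Int) :=
  checkRangesGo bases lookups values []

-- ===== PORT B =====
def check_ranges_alt (bases : List Int) (lookups : List (Option (List Int))) (values : List Int) : Option (List Int) :=
  let triples := bases.zip (lookups.zip values)
  if triples.all (fun t =>
      match t.2.1 with
      | none => t.2.2 == t.1
      | some lk => decide (0 ≤ t.2.2 - t.1 ∧ t.2.2 - t.1 < lk.length)) then
    some (triples.filterMap (fun t =>
      t.2.1.map (fun lk => (PySem.List.pyGet? lk (t.2.2 - t.1)).getD 0)))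
  else
    none

-- ===== PRECONDITION & SPEC =====
def Spec_check_ranges (bases : List Int) (lookups : List (Option (List Int))) (values : List Int) (out : Option (List Int)) : Prop := out = check_ranges_alt bases lookups values
instance (bases : List Int) (lookups : List (Option (List Int))) (values : List Int) (out : Option (List Int)) : Decidable (Spec_check_ranges bases lookups values out) := by unfold Spec_check_ranges; infer_instance

-- ===== CLAIM (what is proved, stated in full; the proofs are below) =====
def Claim_equal_check_ranges : Prop := ∀ (bases : List Int) (lookups : List (Option (List Int))) (values : List Int), Dom_check_ranges bases lookups values → Spec_check_ranges bases lookups values (check_ranges bases lookups values)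

-- ===== LEMMAS AND PROOFS =====

-- invariant of A's loop: the accumulator prefixes B's validated construction
lemma checkRangesGo_eq (bases : List Int) (lookups : List (Option (List Int))) (values : List Int) :
    ∀ result : List Int, checkRangesGo bases lookups values result =
      (let triples := bases.zip (lookups.zip values)
       if triples.all (fun t =>
           match t.2.1 with
           | none => t.2.2 == t.1
           | some lk => decide (0 ≤ t.2.2 - t.1 ∧ t.2.2 - t.1 < lk.length)) then
         some (result ++ triples.filterMap (fun t =>
           t.2.1.map (fun lk => (PySem.List.pyGet? lk (t.2.2 - t.1)).getD 0)))
       else none) := by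
  induction bases generalizing lookups values with
  | nil => intro result; simp [checkRangesGo]
  | cons base bs ih =>
    intro result
    match lookups, values with
    | [], _ => simp [checkRangesGo]
    | _ :: _, [] => simp [checkRangesGo]
    | lookup :: ls, value :: vs =>
      match lookup with
      | none =>
        by_cases h : value = base
        · subst h
          simp only [checkRangesGo, bne_self_eq_false, Bool.false_eq_true, if_false, ih,
            List.zip_cons_cons, List.all_cons, List.filterMap_cons, Option.map_none,
            beq_self_eq_true, Bool.true_and]
        · simp [checkRangesGo, h, Ne.symm h]
      | some lk =>
        by_cases h : 0 ≤ value - base ∧ value - base < (lk.length : Int)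
        · simp only [checkRangesGo, h, if_true, ih]
          simp only [List.zip_cons_cons, List.all_cons, List.filterMap_cons, Option.map_some,
            h, decide_true, Bool.true_and, List.append_assoc, List.singleton_append]
          rw [if_pos]; · rfl
          · simp [h]
        · simp only [checkRangesGo, h, if_false]
          simp only [List.zip_cons_cons, List.all_cons]
          rw [if_neg]
          simp only [Bool.and_eq_true, decide_eq_true_eq]
          tauto

-- ===== VERDICT =====
theorem check_ranges_spec : Claim_equal_check_ranges := by
  intro bases lookups values _
  unfold Spec_check_ranges check_ranges check_ranges_alt
  simp [checkRangesGo_eq]
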